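-- pv_equiv track=rewrite | github.com/mik11231/python | advent2017/Day21/day21.py | rots
-- ===== SOURCE A (Python) =====
-- def rots(grid: tuple[str, ...]) -> list[tuple[str, ...]]:
--     """
--     Run `rots` as a clearly documented algorithm stage.
--
--     Methodology:
--     - Treat this function as one deterministic step in the Advent pipeline.
--     - Keep parsing, state transitions, and result emission easy to audit.
--     - Favor explicit control flow so behavior can be reasoned about from docs alone.
--
--     Parameters: grid.
--     - Returns the computed result for this stage of the pipeline.
--     """
--     out = []
--     g = grid
--     for _ in range(4):
--         out.append(g)
--         n = len(g)
--         g = tuple("".join(g[n - 1 - c][r] for c in range(n)) for r in range(n))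
--     return out
-- ===== SOURCE B (Python) =====
-- def rots(grid):
--     """Four orientations computed directly from the original grid by index
--     formulas (identity, 90, 180, 270 degrees), no threaded accumulator."""
--     n = len(grid)
--     return [
--         tuple(grid),
--         tuple("".join(grid[n - 1 - c][r] for c in range(n)) for r in range(n)),
--         tuple("".join(grid[n - 1 - r][n - 1 - c] for c in range(n)) for r in range(n)),
--         tuple("".join(grid[c][n - 1 - r] for c in range(n)) for r in range(n)),
--     ]
-- ===== Notes on version B (the rewrite author's own statement) =====
-- stated objective: alternative
-- what changed: B computes each of the four orientations directly from the original grid with its own closed index formula (identity, 90, 180, 270 degrees) instead of threading an accumulator through four successive 90-degree rotations.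
import Mathlib
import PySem

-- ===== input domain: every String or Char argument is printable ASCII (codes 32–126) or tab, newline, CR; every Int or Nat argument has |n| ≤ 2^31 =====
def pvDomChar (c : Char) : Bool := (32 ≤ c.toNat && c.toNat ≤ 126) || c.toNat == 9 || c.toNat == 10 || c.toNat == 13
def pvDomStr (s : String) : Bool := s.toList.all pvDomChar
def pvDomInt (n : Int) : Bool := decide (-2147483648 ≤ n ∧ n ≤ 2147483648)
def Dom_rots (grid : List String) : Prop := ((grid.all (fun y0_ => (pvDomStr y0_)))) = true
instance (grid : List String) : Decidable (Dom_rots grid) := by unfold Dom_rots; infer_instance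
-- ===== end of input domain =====

-- B computes the four orientations directly from the original grid by index formulas
-- instead of threading an accumulator through four successive rotations.

-- shared indexing helper g[i][j]: Python raises on an out-of-range character index;
-- those inputs are excluded by Pre_rots, so the default is never reached there.
def pvCh (g : List String) (i j : Int) : Char :=
  ((PySem.List.pyGet? g i).bind (fun s => PySem.Str.pyGet? s j)).getD ' '

-- ===== PORT A =====
-- one 90° rotation, A's inner tuple comprehension; ''.join of the length-1 strings
-- g[n-1-c][r] is exactly String.ofList of the character list
def pvRotA (g : List String) : List String :=
  let n : Int := PySem.List.len g
  (PySem.List.pyRange 0 n 1).map (fun r =>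
    String.ofList ((PySem.List.pyRange 0 n 1).map (fun c => pvCh g (n - 1 - c) r)))

def rots (grid : List String) : List (List String) :=
  ((PySem.List.pyRange 0 4 1).foldl
    (fun (st : List (List String) × List String) _ =>
      (st.1 ++ [st.2], pvRotA st.2)) ([], grid)).1

-- ===== PORT B =====
def rots_alt (grid : List String) : List (List String) :=
  let n : Int := PySem.List.len grid
  [ grid,
    (PySem.List.pyRange 0 n 1).map (fun r =>
      String.ofList ((PySem.List.pyRange 0 n 1).map (fun c => pvCh grid (n - 1 - c) r))),
    (PySem.List.pyRange 0 n 1).map (fun r =>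
      String.ofList ((PySem.List.pyRange 0 n 1).map (fun c => pvCh grid (n - 1 - r) (n - 1 - c)))),
    (PySem.List.pyRange 0 n 1).map (fun r =>
      String.ofList ((PySem.List.pyRange 0 n 1).map (fun c => pvCh grid c (n - 1 - r)))) ]

-- ===== PRECONDITION & SPEC =====
-- Pre_ excludes grids with a row shorter than the number of rows, on which both
-- Python programs raise IndexError (the character index runs up to len(grid)-1).
def Pre_rots (grid : List String) : Prop :=
  ∀ s ∈ grid, grid.length ≤ s.toList.length
instance (grid : List String) : Decidable (Pre_rots grid) := by unfold Pre_rots; infer_instance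
def pvWitness_rots : List String := ["#.", ".#"]

def Spec_rots (grid : List String) (out : List (List String)) : Prop := out = rots_alt grid
instance (grid : List String) (out : List (List String)) : Decidable (Spec_rots grid out) := by unfold Spec_rots; infer_instance

-- ===== CLAIM (what is proved, stated in full; the proofs are below) =====
def Claim_equal_rots : Prop := ∀ (grid : List String), Dom_rots grid → Pre_rots grid → Spec_rots grid (rots grid)

-- ===== LEMMAS AND PROOFS =====

theorem length_pvRotA (g : List String) : (pvRotA g).length = g.length := by
  simp [pvRotA, PySem.List.length_pyRange_one]

-- a character of the rotated grid, read back in terms of the original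
theorem pvCh_pvRotA (g : List String) (i j : Int)
    (hi0 : 0 ≤ i) (hi : i < (g.length : Int)) (hj0 : 0 ≤ j) (hj : j < (g.length : Int)) :
    pvCh (pvRotA g) i j = pvCh g ((g.length : Int) - 1 - j) i := by
  conv_lhs => rw [pvCh, pvRotA]
  simp only [PySem.List.len_eq]
  rw [PySem.List.pyGet?_of_nonneg _ hi0]
  rw [PySem.List.getElem?_map_pyRange_zero _ _ _ (by omega : i.toNat < g.length)]
  simp only [Option.bind_some]
  rw [show PySem.Str.pyGet? (String.ofList (List.map (fun c => pvCh g (↑g.length - 1 - c) ↑i.toNat) (PySem.List.pyRange 0 (↑g.length) 1))) j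
      = PySem.List.pyGet? (List.map (fun c => pvCh g (↑g.length - 1 - c) ↑i.toNat) (PySem.List.pyRange 0 (↑g.length) 1)) j from by
    simp [PySem.Str.pyGet?]]
  rw [PySem.List.pyGet?_of_nonneg _ hj0]
  rw [PySem.List.getElem?_map_pyRange_zero _ _ _ (by omega : j.toNat < g.length)]
  rw [pvCh]
  simp only [Option.getD_some]
  rw [Int.toNat_of_nonneg hi0, Int.toNat_of_nonneg hj0]
  rfl

-- the second successive rotation, expressed directly over the original grid
theorem rot2_eq (g : List String) :
    pvRotA (pvRotA g) =
      (PySem.List.pyRange 0 (g.length : Int) 1).map (fun r =>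
        String.ofList ((PySem.List.pyRange 0 (g.length : Int) 1).map (fun c =>
          pvCh g ((g.length : Int) - 1 - r) ((g.length : Int) - 1 - c)))) := by
  conv_lhs => rw [pvRotA]
  simp only [PySem.List.len_eq, length_pvRotA]
  apply List.map_congr_left
  intro r hr
  rw [PySem.List.mem_pyRange_one] at hr
  congr 1
  apply List.map_congr_left
  intro c hc
  rw [PySem.List.mem_pyRange_one] at hc
  rw [pvCh_pvRotA g _ _ (by omega) (by omega) (by omega) (by omega)]

-- the third successive rotation, expressed directly over the original grid
theorem rot3_eq (g : List String) :
    pvRotA (pvRotA (pvRotA g)) =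
      (PySem.List.pyRange 0 (g.length : Int) 1).map (fun r =>
        String.ofList ((PySem.List.pyRange 0 (g.length : Int) 1).map (fun c =>
          pvCh g c ((g.length : Int) - 1 - r)))) := by
  conv_lhs => rw [pvRotA]
  simp only [PySem.List.len_eq, length_pvRotA]
  apply List.map_congr_left
  intro r hr
  rw [PySem.List.mem_pyRange_one] at hr
  congr 1
  apply List.map_congr_left
  intro c hc
  rw [PySem.List.mem_pyRange_one] at hc
  rw [show ((g.length : Int) - 1 - c) = ((pvRotA g).length : Int) - 1 - c by
        rw [length_pvRotA]]
  rw [pvCh_pvRotA (pvRotA g) _ _ (by simp [length_pvRotA]; omega)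
        (by simp [length_pvRotA]; omega) (by omega) (by simp [length_pvRotA]; omega)]
  rw [length_pvRotA]
  rw [pvCh_pvRotA g _ _ (by omega) (by omega) (by omega) (by omega)]
  congr 1
  omega

-- ===== VERDICT (by name: the statement is the Claim_ definition above) =====
theorem rots_spec : Claim_equal_rots := by
  intro grid _ _
  show [grid, pvRotA grid, pvRotA (pvRotA grid), pvRotA (pvRotA (pvRotA grid))] = rots_alt grid
  rw [rot3_eq, rot2_eq]
  simp only [rots_alt, PySem.List.len_eq, pvRotA]
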